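-- pv_equiv track=rewrite | github.com/eshremu/Django-PCBM | utils.py | GetLetterCode
-- ===== SOURCE A (Python) =====
-- def GetLetterCode(iColumn):
--     """
--     Converts iColumn to its corresponding letter(s) value.
--     :param iColumn:
--     :return:
--     """
--
--     if not 1 <= iColumn:
--         raise ValueError("Invalid column number: " + str(iColumn))
--     # end if
--
--     if iColumn > 26:
--         # The return value of iColumn // 26 is one greater than what it
--         # should be on each multiple of 26. For example, GetLetterCode(52)
--         # should return AZ, but because 52 // 26 is 2, it instead returns
--         # B@. So, a minor correction is required for cases in which iColumn
--         # is a multiple of 26.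
--         if iColumn % 26 == 0:
--             iModifier = (iColumn // 26) - 1
--             iConvertToChar = 26
--         else:
--             iModifier = (iColumn // 26)
--             iConvertToChar = iColumn % 26
--         # end if
--
--         return GetLetterCode(iModifier) + chr(iConvertToChar + 64)
--     else:
--         return chr(iColumn + 64)
-- ===== SOURCE B (Python) =====
-- def GetLetterCode(iColumn):
--     """
--     Converts iColumn to its corresponding letter(s) value.
--     :param iColumn:
--     :return:
--     """
--     if not 1 <= iColumn:
--         raise ValueError("Invalid column number: " + str(iColumn))
--     n = iColumn
--     result = ""
--     while n > 0:
--         n, rem = divmod(n - 1, 26)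
--         result = chr(rem + 65) + result
--     return result
-- ===== Notes on version B (the rewrite author's own statement) =====
-- stated objective: idiomatic
-- what changed: Replaces the recursive multiple-of-26 special-case logic with the standard iterative bijective base-26 loop (divmod on n-1, prepending characters), which needs no correction branch.
import Mathlib
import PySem

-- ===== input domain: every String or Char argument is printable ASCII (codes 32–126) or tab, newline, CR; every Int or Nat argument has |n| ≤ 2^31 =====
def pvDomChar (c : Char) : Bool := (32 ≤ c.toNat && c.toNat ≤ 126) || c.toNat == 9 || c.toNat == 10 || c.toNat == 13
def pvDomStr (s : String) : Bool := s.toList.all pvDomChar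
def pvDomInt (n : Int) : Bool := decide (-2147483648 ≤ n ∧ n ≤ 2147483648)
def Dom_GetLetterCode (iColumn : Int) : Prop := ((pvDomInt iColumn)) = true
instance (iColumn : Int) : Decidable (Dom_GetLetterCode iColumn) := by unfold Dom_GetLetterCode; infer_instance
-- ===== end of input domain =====

-- B replaces A's recursion with the standard iterative bijective base-26 loop (divmod on n-1), same values; idiomatic rewrite, no speed claim.


-- ===== PORT A =====
-- literal port of A's recursion; the ValueError raise on non-positive input is excluded by Pre_.
def GetLetterCode (iColumn : Int) : String :=
  if _h : iColumn > 26 then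
    if PySem.Int.mod iColumn 26 = 0 then
      let iModifier := PySem.Int.floordiv iColumn 26 - 1
      GetLetterCode iModifier ++ (Char.ofNat ((26 : Int) + 64).toNat).toString
    else
      let iModifier := PySem.Int.floordiv iColumn 26
      GetLetterCode iModifier ++ (Char.ofNat (PySem.Int.mod iColumn 26 + 64).toNat).toString
  else
    (Char.ofNat (iColumn + 64).toNat).toString
termination_by iColumn.toNat
decreasing_by
  · have h1 : PySem.Int.floordiv iColumn 26 = iColumn / 26 :=
      PySem.Int.floordiv_eq_ediv_of_pos (by omega)
    simp only [h1]; omega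
  · have h1 : PySem.Int.floordiv iColumn 26 = iColumn / 26 :=
      PySem.Int.floordiv_eq_ediv_of_pos (by omega)
    simp only [h1]; omega

-- ===== PORT B =====
-- the while loop of Source B, as a recursion on the loop state (n, result)
def GetLetterCode_altLoop (n : Int) (result : String) : String :=
  if _h : n > 0 then
    let q := PySem.Int.floordiv (n - 1) 26
    let rem := PySem.Int.mod (n - 1) 26
    GetLetterCode_altLoop q ((Char.ofNat (rem + 65).toNat).toString ++ result)
  else
    result
termination_by n.toNat
decreasing_by
  have h1 : PySem.Int.floordiv (n - 1) 26 = (n - 1) / 26 :=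
    PySem.Int.floordiv_eq_ediv_of_pos (by omega)
  simp only [h1]; omega

def GetLetterCode_alt (iColumn : Int) : String :=
  GetLetterCode_altLoop iColumn ""

-- ===== PRECONDITION & SPEC =====
-- A raises ValueError on non-positive column numbers; exactly those inputs are excluded.
def Pre_GetLetterCode (iColumn : Int) : Prop := 1 ≤ iColumn
instance (iColumn : Int) : Decidable (Pre_GetLetterCode iColumn) := by unfold Pre_GetLetterCode; infer_instance
def pvWitness_GetLetterCode : Int := (52)

def Spec_GetLetterCode (iColumn : Int) (out : String) : Prop := out = GetLetterCode_alt iColumn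
instance (iColumn : Int) (out : String) : Decidable (Spec_GetLetterCode iColumn out) := by unfold Spec_GetLetterCode; infer_instance

-- ===== CLAIM (what is proved, stated in full; the proofs are below) =====
def Claim_equal_GetLetterCode : Prop := ∀ (iColumn : Int), Dom_GetLetterCode iColumn → Pre_GetLetterCode iColumn → Spec_GetLetterCode iColumn (GetLetterCode iColumn)

-- ===== LEMMAS AND PROOFS =====

-- the loop's accumulator only ever receives appends on the right
theorem altLoop_acc (n : Int) (r : String) :
    GetLetterCode_altLoop n r = GetLetterCode_altLoop n "" ++ r := by
  induction hn : n.toNat using Nat.strong_induction_on generalizing n r with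
  | _ k ih =>
  by_cases hpos : n > 0
  · have hq : PySem.Int.floordiv (n - 1) 26 = (n - 1) / 26 :=
      PySem.Int.floordiv_eq_ediv_of_pos (by omega)
    conv_lhs => rw [GetLetterCode_altLoop]
    conv_rhs => rw [GetLetterCode_altLoop]
    simp only [dif_pos hpos]
    rw [ih (PySem.Int.floordiv (n - 1) 26).toNat (by rw [hq]; omega) _ _ rfl,
        ih (PySem.Int.floordiv (n - 1) 26).toNat (by rw [hq]; omega) _
          ((Char.ofNat (PySem.Int.mod (n - 1) 26 + 65).toNat).toString ++ "") rfl]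
    simp only [String.append_assoc, String.append_empty]
  · conv_rhs => rw [GetLetterCode_altLoop]
    conv_lhs => rw [GetLetterCode_altLoop]
    simp [dif_neg hpos]

theorem main_eq (n : Int) (h : 1 ≤ n) : GetLetterCode n = GetLetterCode_altLoop n "" := by
  induction hn : n.toNat using Nat.strong_induction_on generalizing n with
  | _ k ih =>
  have hfd : PySem.Int.floordiv (n - 1) 26 = (n - 1) / 26 :=
    PySem.Int.floordiv_eq_ediv_of_pos (by omega)
  have hfm : PySem.Int.mod (n - 1) 26 = (n - 1) % 26 :=
    PySem.Int.mod_eq_emod_of_pos (by omega)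
  by_cases h26 : n > 26
  · have hfd' : PySem.Int.floordiv n 26 = n / 26 :=
      PySem.Int.floordiv_eq_ediv_of_pos (by omega)
    have hfm' : PySem.Int.mod n 26 = n % 26 :=
      PySem.Int.mod_eq_emod_of_pos (by omega)
    rw [GetLetterCode, GetLetterCode_altLoop]
    simp only [dif_pos h26, dif_pos (by omega : n > 0), hfd, hfm, hfd', hfm']
    rw [altLoop_acc]
    by_cases hz : n % 26 = 0
    · have hq : (n - 1) / 26 = n / 26 - 1 := by omega
      have hr : (n - 1) % 26 = 25 := by omega
      rw [if_pos hz, hq, hr]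
      rw [ih (n / 26 - 1).toNat (by omega) _ (by omega) rfl]
      norm_num
    · have hq : (n - 1) / 26 = n / 26 := by omega
      have hr : (n - 1) % 26 = n % 26 - 1 := by omega
      rw [if_neg hz, hq, hr]
      rw [ih (n / 26).toNat (by omega) _ (by omega) rfl]
      have : n % 26 - 1 + 65 = n % 26 + 64 := by omega
      rw [this]
      norm_num
  · -- base: 1 ≤ n ≤ 26, one loop iteration
    rw [GetLetterCode, GetLetterCode_altLoop]
    simp only [dif_neg h26, dif_pos (by omega : n > 0), hfd, hfm]
    have hq : (n - 1) / 26 = 0 := by omega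
    have hr : (n - 1) % 26 = n - 1 := by omega
    rw [hq, hr, GetLetterCode_altLoop]
    have : n - 1 + 65 = n + 64 := by omega
    simp [this]

-- ===== VERDICT (by name: the statement is the Claim_ definition above) =====
theorem GetLetterCode_spec : Claim_equal_GetLetterCode := by
  intro n _ hpre
  unfold Spec_GetLetterCode GetLetterCode_alt
  exact main_eq n hpre
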